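-- pv_equiv track=rewrite | github.com/srirambandi/pokerBot | mctsPlayer.py | haveRoyalFlush
-- ===== SOURCE A (Python) =====
-- def haveRoyalFlush(cards):
--   if len(cards) < 5:
--     return (-5, None)  # we need at least 5 cards to make a royal flush
--
--   # check each suit
--   suits = ["H", "D", "C", "S"]
--   bestDistance = -5  # worst case
--
--   for suit in suits:
--     royalRanks = ["T", "J", "Q", "K", "A"]
--     # Check which royal cards we have for this suit
--     missingCards = 0
--     for rank in royalRanks:
--       if not any(card[0] == suit and card[1] == rank for card in cards):
--         missingCards += 1
--
--     if missingCards == 0: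
--       return (1, "high")  # Royal flush is always high
--
--     distance = -missingCards
--     if distance > bestDistance:
--       bestDistance = distance
--
--   return (bestDistance, "high")  # Royal flush is always categorized as high
-- ===== SOURCE B (Python) =====
-- def haveRoyalFlush(cards):
--   if len(cards) < 5:
--     return (-5, None)  # we need at least 5 cards to make a royal flush
--
--   # distinct royal cards in the hand (a set: duplicates collapse, existence semantics)
--   present = {card[:2] for card in cards
--              if len(card) >= 2 and card[0] in "HDCS" and card[1] in "TJQKA"}
--
--   # per-suit tally of how many of the five royal ranks are present
--   firsts = [c[0] for c in present]
--   counts = {}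
--   for s in firsts:
--     counts[s] = counts.get(s, 0) + 1
--
--   best = max(counts.get(s, 0) for s in "HDCS")
--   return (1, "high") if best == 5 else (best - 5, "high")
-- ===== Notes on version B (the rewrite author's own statement) =====
-- stated objective: faster
-- what changed: A runs 20 scans of the hand (4 suits x 5 ranks, an any() each) with an early-return/best-accumulator suit loop; B makes one filtering pass collecting the distinct royal cards into a set, tallies suits in a dict, and turns the suit loop into arithmetic on the maximum tally (best==5 -> (1,'high'), else (best-5,'high')).
import Mathlib
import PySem

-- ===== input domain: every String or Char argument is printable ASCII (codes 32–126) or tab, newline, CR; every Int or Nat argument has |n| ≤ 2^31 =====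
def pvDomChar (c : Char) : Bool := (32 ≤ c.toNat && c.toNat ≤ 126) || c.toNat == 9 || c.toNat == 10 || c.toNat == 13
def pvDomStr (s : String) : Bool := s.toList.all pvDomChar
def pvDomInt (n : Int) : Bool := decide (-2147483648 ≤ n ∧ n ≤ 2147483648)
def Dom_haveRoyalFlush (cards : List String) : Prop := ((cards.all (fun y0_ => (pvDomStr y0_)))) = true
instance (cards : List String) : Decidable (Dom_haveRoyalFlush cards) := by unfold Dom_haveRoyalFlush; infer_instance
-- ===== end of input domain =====

-- B replaces A's 20 scans of the hand (4 suits × 5 ranks, an any() each) and its early-return suit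
-- loop by one filtering pass into a set of distinct royal cards, a suit tally dict, and arithmetic
-- on the maximum tally (objective: faster by a constant factor, measured).

-- ===== PORT A =====
-- Python's cards are strings "<suit><rank>…"; card[0]/card[1] are 1-char strings, ported as Chars.
def pvSuits : List Char := ['H', 'D', 'C', 'S']
def pvRoyalRanks : List Char := ['T', 'J', 'Q', 'K', 'A']

-- any(card[0] == suit and card[1] == rank for card in cards); where Python would raise IndexError
-- (excluded by Pre_) pyGet? is none and the comparison is false.
def pvAnyMatch (cards : List String) (suit rank : Char) : Bool :=
  cards.any (fun card =>
    (PySem.Str.pyGet? card 0 == some suit) && (PySem.Str.pyGet? card 1 == some rank))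

-- the inner 'for rank in royalRanks: if not any(...): missingCards += 1'
def pvMissingA (cards : List String) (suit : Char) : Int :=
  pvRoyalRanks.foldl (fun m r => if !(pvAnyMatch cards suit r) then m + 1 else m) 0

-- the outer 'for suit in suits' loop with its early return and bestDistance accumulator
def pvLoopA (cards : List String) : List Char → Int → Int × Option String
  | [], best => (best, some "high")
  | s :: rest, best =>
    let missing := pvMissingA cards s
    if missing = 0 then (1, some "high")
    else pvLoopA cards rest (if -missing > best then -missing else best)

def haveRoyalFlush (cards : List String) : Int × Option String :=
  if cards.length < 5 then (-5, none)
  else pvLoopA cards pvSuits (-5)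

-- ===== PORT B =====
-- the set-comprehension filter: len(card) >= 2 and card[0] in "HDCS" and card[1] in "TJQKA",
-- yielding card[:2]; pyGet? card 0/1 are both some iff len(card) >= 2, and then card[:2] is
-- exactly the two-character string of those chars.
def pvRoyalCard? (card : String) : Option String :=
  match PySem.Str.pyGet? card 0, PySem.Str.pyGet? card 1 with
  | some a, some b => if a ∈ pvSuits ∧ b ∈ pvRoyalRanks then some (String.ofList [a, b]) else none
  | _, _ => none

-- present = {card[:2] for card in cards if …}
def pvPresent (cards : List String) : PySem.Set String :=
  PySem.Set.ofList (cards.filterMap pvRoyalCard?)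

-- firsts = [c[0] for c in present]  (every element of present has length 2, so c[0] never raises)
def pvFirsts (present : List String) : List Char :=
  present.filterMap (fun c => PySem.Str.pyGet? c 0)

-- for s in firsts: counts[s] = counts.get(s, 0) + 1
def pvCounts (firsts : List Char) : PySem.Dict Char Int :=
  firsts.foldl (fun d s => d.insert s (d.getD s 0 + 1)) PySem.Dict.empty

-- best = max(counts.get(s, 0) for s in "HDCS")
def pvBest (counts : PySem.Dict Char Int) : Int :=
  match PySem.List.max? (pvSuits.map (fun s => counts.getD s 0)) (fun x => x) with
  | some m => m
  | none => 0  -- unreachable: pvSuits is a nonempty literal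

def haveRoyalFlush_alt (cards : List String) : Int × Option String :=
  if cards.length < 5 then (-5, none)
  else
    let best := pvBest (pvCounts (pvFirsts (pvPresent cards)))
    if best == 5 then (1, some "high") else (best - 5, some "high")

-- ===== PRECONDITION & SPEC =====
-- card c read during a scan for suit s raises IndexError in A iff c is empty (card[0] raises) or
-- is the single character s (card[0]==s short-circuit passes, card[1] raises)
def pvProblem (c : String) (s : Char) : Bool :=
  match c.toList with
  | [] => true
  | [a] => a == s
  | _ => false

-- Python's true card match for suit s, rank r: length ≥ 2 and first two chars s, r
def pvIsMatch (c : String) (s r : Char) : Bool :=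
  (PySem.Str.pyGet? c 0 == some s) && (PySem.Str.pyGet? c 1 == some r)

-- suit s's five scans raise iff some problem card for s is reached before a match in one of them
def pvRaiseS (cards : List String) (s : Char) : Bool :=
  pvRoyalRanks.any (fun r => (List.range cards.length).any (fun i =>
    pvProblem (cards.getD i "") s && (List.range i).all (fun j => !(pvIsMatch (cards.getD j "") s r))))

-- suit s is a complete royal flush (A returns early there if its scans did not raise)
def pvCompleteS (cards : List String) (s : Char) : Bool :=
  pvRoyalRanks.all (fun r => cards.any (fun c => pvIsMatch c s r))

-- Pre_ excludes EXACTLY the hands on which the Python A raises IndexError: a suit scan, reached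
-- before any early return, meets an empty card or a lone matching suit letter before any() finds
-- a match. On every input A returns on, Pre_ holds and B returns the same value. (On the excluded
-- hands the Python B, which skips cards shorter than two characters, simply returns the distance.)
def Pre_haveRoyalFlush (cards : List String) : Prop :=
  cards.length < 5 ∨
    (pvRaiseS cards 'H' = false ∧ (pvCompleteS cards 'H' = true ∨
      (pvRaiseS cards 'D' = false ∧ (pvCompleteS cards 'D' = true ∨
        (pvRaiseS cards 'C' = false ∧ (pvCompleteS cards 'C' = true ∨ pvRaiseS cards 'S' = false))))))
instance (cards : List String) : Decidable (Pre_haveRoyalFlush cards) := by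
  unfold Pre_haveRoyalFlush; infer_instance
def pvWitness_haveRoyalFlush : List String := ["HT", "D3", "x", "y", "zz"]

def Spec_haveRoyalFlush (cards : List String) (out : Int × Option String) : Prop := out = haveRoyalFlush_alt cards
instance (cards : List String) (out : Int × Option String) : Decidable (Spec_haveRoyalFlush cards out) := by unfold Spec_haveRoyalFlush; infer_instance

-- ===== CLAIM (what is proved, stated in full; the proofs are below) =====
def Claim_equal_haveRoyalFlush : Prop := ∀ (cards : List String), Dom_haveRoyalFlush cards → Pre_haveRoyalFlush cards → Spec_haveRoyalFlush cards (haveRoyalFlush cards)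

-- ===== LEMMAS AND PROOFS =====

lemma mem_present (cards : List String) (x : String) :
    x ∈ pvPresent cards ↔
      ∃ a b, x = String.ofList [a, b] ∧ a ∈ pvSuits ∧ b ∈ pvRoyalRanks ∧ pvAnyMatch cards a b = true := by
  unfold pvPresent pvAnyMatch
  rw [PySem.Set.mem_ofList, List.mem_filterMap]
  constructor
  · rintro ⟨c, hc, hf⟩
    unfold pvRoyalCard? at hf
    simp only [PySem.Str.pyGet?, PySem.Chars.pyGet?_eq_listPyGet?] at hf ⊢
    cases h0 : PySem.List.pyGet? c.toList 0 with
    | none => simp [h0] at hf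
    | some a =>
      cases h1 : PySem.List.pyGet? c.toList 1 with
      | none => simp [h0, h1] at hf
      | some b =>
        simp only [h0, h1] at hf
        split at hf
        · rename_i hmem
          refine ⟨a, b, by simp_all, hmem.1, hmem.2, ?_⟩
          simp only [List.any_eq_true]
          exact ⟨c, hc, by simp [PySem.Str.pyGet?, PySem.Chars.pyGet?_eq_listPyGet?, h0, h1]⟩
        · simp at hf
  · rintro ⟨a, b, rfl, ha, hb, hany⟩
    simp only [PySem.Str.pyGet?, PySem.Chars.pyGet?_eq_listPyGet?, List.any_eq_true, Bool.and_eq_true, beq_iff_eq] at hany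
    obtain ⟨c, hc, h0, h1⟩ := hany
    exact ⟨c, hc, by unfold pvRoyalCard?; simp [PySem.Str.pyGet?, PySem.Chars.pyGet?_eq_listPyGet?, h0, h1, ha, hb]⟩

lemma count_filterMap {α β : Type} [DecidableEq β] (f : α → Option β) (l : List α) (y : β) :
    (l.filterMap f).count y = (l.filter (fun x => f x == some y)).length := by
  induction l with
  | nil => rfl
  | cons a t ih =>
    cases h : f a with
    | none => simp [h, ih]
    | some b =>
      by_cases hb : b = y
      · subst hb; simp [h, ih]
      · simp [h, ih, hb]

lemma filter_present_perm (cards : List String) (s : Char) (hs : s ∈ pvSuits) :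
    ((pvPresent cards).filter (fun c => PySem.Str.pyGet? c 0 == some s)).Perm
      ((pvRoyalRanks.filter (fun r => pvAnyMatch cards s r)).map (fun r => String.ofList [s, r])) := by
  apply (List.perm_ext_iff_of_nodup ?_ ?_).mpr
  · intro x
    simp only [List.mem_filter, List.mem_map, List.mem_filter, mem_present]
    constructor
    · rintro ⟨⟨a, b, rfl, ha, hb, hany⟩, hp⟩
      have : a = s := by
        simp [PySem.Str.pyGet?, PySem.Chars.pyGet?_eq_listPyGet?, String.toList_ofList,
          PySem.List.pyGet?_zero_cons] at hp
        exact hp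
      subst this
      exact ⟨b, ⟨hb, hany⟩, rfl⟩
    · rintro ⟨r, ⟨hr, hany⟩, rfl⟩
      refine ⟨⟨s, r, rfl, hs, hr, hany⟩, ?_⟩
      simp [PySem.Str.pyGet?, PySem.Chars.pyGet?_eq_listPyGet?, String.toList_ofList,
        PySem.List.pyGet?_zero_cons]
  · exact (PySem.Set.nodup_ofList _).filter _
  · apply List.Nodup.map_on
    · intro r _ r' _ h
      have := congrArg String.toList h
      simp only [String.toList_ofList, List.cons.injEq] at this
      exact this.2.1
    · exact (by decide : pvRoyalRanks.Nodup).filter _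

lemma counts_eq (cards : List String) (s : Char) (hs : s ∈ pvSuits) :
    (pvCounts (pvFirsts (pvPresent cards))).getD s 0
      = ((pvRoyalRanks.filter (fun r => pvAnyMatch cards s r)).length : Int) := by
  unfold pvCounts pvFirsts
  rw [PySem.Dict.getD_foldl_insert_add_one]
  rw [count_filterMap]
  rw [(filter_present_perm cards s hs).length_eq]
  simp [PySem.Dict.getD_empty]

lemma counts_bounds (cards : List String) (s : Char) (hs : s ∈ pvSuits) :
    0 ≤ (pvCounts (pvFirsts (pvPresent cards))).getD s 0 ∧
      (pvCounts (pvFirsts (pvPresent cards))).getD s 0 ≤ 5 := by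
  rw [counts_eq cards s hs]
  have h := List.length_filter_le (fun r => pvAnyMatch cards s r) pvRoyalRanks
  have h5 : pvRoyalRanks.length = 5 := rfl
  omega

lemma missing_eq (cards : List String) (s : Char) (hs : s ∈ pvSuits) :
    pvMissingA cards s = 5 - (pvCounts (pvFirsts (pvPresent cards))).getD s 0 := by
  rw [counts_eq cards s hs]
  unfold pvMissingA pvRoyalRanks
  cases hT : pvAnyMatch cards s 'T' <;> cases hJ : pvAnyMatch cards s 'J' <;>
    cases hQ : pvAnyMatch cards s 'Q' <;> cases hK : pvAnyMatch cards s 'K' <;>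
    cases hA : pvAnyMatch cards s 'A' <;>
    simp [hT, hJ, hQ, hK, hA, List.filter]

set_option maxHeartbeats 1000000 in
lemma loop_vs_bound (cards : List String) (cH cD cC cS : Int)
    (eH : pvMissingA cards 'H' = 5 - cH) (eD : pvMissingA cards 'D' = 5 - cD)
    (eC : pvMissingA cards 'C' = 5 - cC) (eS : pvMissingA cards 'S' = 5 - cS)
    (M : Int) (h1 : cH ≤ M) (h2 : cD ≤ M) (h3 : cC ≤ M) (h4 : cS ≤ M)
    (h5 : M = cH ∨ M = cD ∨ M = cC ∨ M = cS)
    (bH : 0 ≤ cH ∧ cH ≤ 5) (bD : 0 ≤ cD ∧ cD ≤ 5) (bC : 0 ≤ cC ∧ cC ≤ 5) (bS : 0 ≤ cS ∧ cS ≤ 5) :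
    pvLoopA cards pvSuits (-5)
      = (if ((M == 5) : Bool) then ((1 : Int), some "high") else (M - 5, some "high")) := by
  simp only [pvSuits, pvLoopA, eH, eD, eC, eS, beq_iff_eq]
  rcases h5 with h5 | h5 | h5 | h5 <;>
    (split_ifs <;>
      first | rfl | (exfalso; omega) | (simp only [Prod.mk.injEq]; exact ⟨by omega, trivial⟩))

-- ===== VERDICT (by name: the statement is the Claim_ definition above) =====
theorem haveRoyalFlush_spec : Claim_equal_haveRoyalFlush := by
  intro cards _ _
  unfold Spec_haveRoyalFlush haveRoyalFlush haveRoyalFlush_alt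
  by_cases h : cards.length < 5
  · simp [h]
  · simp only [h, if_neg h, if_false]
    set d := pvCounts (pvFirsts (pvPresent cards)) with hd
    set cH := d.getD 'H' 0
    set cD := d.getD 'D' 0
    set cC := d.getD 'C' 0
    set cS := d.getD 'S' 0
    have hbest : pvBest d = max (max (max cH cD) cC) cS := by
      unfold pvBest pvSuits
      simp only [List.map_cons, List.map_nil, PySem.List.max?_id_cons, List.foldl_cons,
        List.foldl_nil]
      rfl
    rw [hbest]
    have h5 : max (max (max cH cD) cC) cS = cH ∨ max (max (max cH cD) cC) cS = cD ∨
        max (max (max cH cD) cC) cS = cC ∨ max (max (max cH cD) cC) cS = cS := by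
      rcases max_choice (max (max cH cD) cC) cS with h4 | h4
      · rcases max_choice (max cH cD) cC with h3 | h3
        · rcases max_choice cH cD with h2 | h2
          · left; rw [h4, h3, h2]
          · right; left; rw [h4, h3, h2]
        · right; right; left; rw [h4, h3]
      · right; right; right; exact h4
    exact loop_vs_bound cards cH cD cC cS
      (missing_eq cards 'H' (by decide)) (missing_eq cards 'D' (by decide))
      (missing_eq cards 'C' (by decide)) (missing_eq cards 'S' (by decide))
      (max (max (max cH cD) cC) cS)
      (le_trans (le_trans (le_max_left cH cD) (le_max_left _ cC)) (le_max_left _ cS))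
      (le_trans (le_trans (le_max_right cH cD) (le_max_left _ cC)) (le_max_left _ cS))
      (le_trans (le_max_right _ cC) (le_max_left _ cS))
      (le_max_right _ cS)
      h5
      (counts_bounds cards 'H' (by decide)) (counts_bounds cards 'D' (by decide))
      (counts_bounds cards 'C' (by decide)) (counts_bounds cards 'S' (by decide))
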